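-- pv_equiv track=rewrite | github.com/Maktor/698cf4c270d26ccb22b2dac8 | s.py | solve_check
-- ===== SOURCE A (Python) =====
-- def solve_check(board):
--     """
--     Backtracking solver that returns the number of solutions found.
--     Stops searching if more than 1 solution is found (puzzle is ambiguous).
--     """
--     find = find_empty(board)
--     if not find:
--         return 1
--     row, col = find
--
--     count = 0
--     for i in range(1, 10):
--         if is_valid(board, i, (row, col)):
--             board[row][col] = i
--             count += solve_check(board)
--             board[row][col] = 0  # Backtrack
--             if count > 1:
--                 return 2  # Found more than one solution, stop early
--     return count
--
-- def is_valid(board, num, pos):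
--     # Check row
--     if num in board[pos[0]]:
--         return False
--
--     # Check column
--     if num in [board[i][pos[1]] for i in range(len(board))]:
--         return False
--
--     # Check 3x3 box
--     box_x = pos[1] // 3
--     box_y = pos[0] // 3
--     for i in range(box_y*3, box_y*3 + 3):
--         for j in range(box_x*3, box_x*3 + 3):
--             if board[i][j] == num:
--                 return False
--     return True
--
-- def find_empty(board):
--     for i in range(len(board)):
--         for j in range(len(board[0])):
--             if board[i][j] == 0:
--                 return (i, j)
--     return None
-- ===== SOURCE B (Python) =====
-- def solve_check(board):
--     """
--     Counts Sudoku solutions (capped at 2) by backtracking over a precomputed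
--     list of empty cells, with incrementally maintained row/column/box
--     constraint sets instead of rescanning the board for every candidate.
--     """
--     w = len(board[0]) if board else 0
--     empties = [(i, j) for i in range(len(board)) for j in range(w)
--                if board[i][j] == 0]
--     if not empties:
--         return 1
--     rows = [set(board[i]) for i in range(9)]
--     cols = [{board[i][j] for i in range(9)} for j in range(9)]
--     boxes = [{board[3 * (b // 3) + di][3 * (b % 3) + dj]
--               for di in range(3) for dj in range(3)} for b in range(9)]
--
--     def go(k):
--         if k == len(empties):
--             return 1
--         r, c = empties[k]
--         b = (r // 3) * 3 + c // 3
--         total = 0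
--         for d in range(1, 10):
--             if d not in rows[r] and d not in cols[c] and d not in boxes[b]:
--                 rows[r].add(d); cols[c].add(d); boxes[b].add(d)
--                 total += go(k + 1)
--                 rows[r].discard(d); cols[c].discard(d); boxes[b].discard(d)
--                 if total > 1:
--                     return 2
--         return total
--
--     return go(0)
-- ===== Notes on version B (the rewrite author's own statement) =====
-- stated objective: faster
-- what changed: B precomputes the empty-cell list once and maintains row/column/box constraint sets incrementally during the backtracking, instead of A's per-step full-board rescan (find_empty) and per-candidate row/column/box scans (is_valid).
-- outside the precondition, e.g. on solve_check([[0, 2, 3], [3, 1, 2], [2, 3, 1]]): A returns 2, B raises IndexError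
import Mathlib
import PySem

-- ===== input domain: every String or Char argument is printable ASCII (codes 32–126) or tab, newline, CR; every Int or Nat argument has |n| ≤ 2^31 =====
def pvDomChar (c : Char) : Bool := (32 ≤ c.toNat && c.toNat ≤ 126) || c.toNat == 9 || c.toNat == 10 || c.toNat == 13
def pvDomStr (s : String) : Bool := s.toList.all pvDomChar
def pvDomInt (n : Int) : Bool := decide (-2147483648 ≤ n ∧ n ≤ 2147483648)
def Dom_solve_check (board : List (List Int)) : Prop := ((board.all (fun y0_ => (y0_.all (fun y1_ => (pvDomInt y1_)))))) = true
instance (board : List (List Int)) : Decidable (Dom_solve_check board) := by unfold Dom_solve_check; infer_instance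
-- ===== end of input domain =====

-- B re-implements the capped solution counter with a precomputed empty-cell list and
-- incrementally maintained row/column/box candidate sets instead of rescanning the board;
-- A mutates `board` in place but always restores it, so the observable behaviour is the return value.

-- shared indexing helpers: both Pythons read board[i][j] the same way; the `.getD` defaults
-- are only reachable where Python would raise IndexError, and those inputs are outside Pre_.
def rowAt (board : List (List Int)) (i : Int) : List Int :=
  (PySem.List.pyGet? board i).getD []

def cellD (board : List (List Int)) (i j : Int) : Int :=
  (PySem.List.pyGet? (rowAt board i) j).getD 1

-- ===== PORT A =====
def find_empty (board : List (List Int)) : Option (Int × Int) :=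
  (PySem.List.pyRange 0 (PySem.List.len board) 1).findSome? (fun i =>
    (PySem.List.pyRange 0 (PySem.List.len (rowAt board 0)) 1).findSome? (fun j =>
      if cellD board i j = 0 then some (i, j) else none))

def is_valid (board : List (List Int)) (num : Int) (pos : Int × Int) : Bool :=
  if (rowAt board pos.1).contains num then false
  else if ((PySem.List.pyRange 0 (PySem.List.len board) 1).map
            (fun i => cellD board i pos.2)).contains num then false
  else
    let box_x := PySem.Int.floordiv pos.2 3
    let box_y := PySem.Int.floordiv pos.1 3
    if (PySem.List.pyRange (box_y * 3) (box_y * 3 + 3) 1).any (fun i =>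
         (PySem.List.pyRange (box_x * 3) (box_x * 3 + 3) 1).any (fun j =>
           cellD board i j == num)) then false
    else true

-- board[r][c] = v (functional update; A mutates and restores, the port passes the updated board)
def setCell (board : List (List Int)) (r c v : Int) : List (List Int) :=
  PySem.List.pySetD board r (PySem.List.pySetD (rowAt board r) c v)

-- fuel measure: number of 0 entries; each recursive call of A fills a genuine 0 cell
def zerosOf (board : List (List Int)) : Nat :=
  (board.map (fun row => row.count 0)).sum

def loopA (solve : List (List Int) → Int) (board : List (List Int)) (r c : Int) :
    List Int → Int → Int
  | [], count => count
  | d :: rest, count =>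
    if is_valid board d (r, c) then
      let count' := count + solve (setCell board r c d)
      if count' > 1 then 2 else loopA solve board r c rest count'
    else loopA solve board r c rest count

def solveA : Nat → List (List Int) → Int
  | 0, _ => 0          -- fuel exhaustion is unreachable: zerosOf strictly decreases
  | f + 1, board =>
    match find_empty board with
    | none => 1
    | some (r, c) => loopA (solveA f) board r c (PySem.List.pyRange 1 10 1) 0

def solve_check (board : List (List Int)) : Int :=
  solveA (zerosOf board + 1) board

-- ===== PORT B =====
def emptiesOf (board : List (List Int)) : List (Int × Int) :=
  (PySem.List.pyRange 0 (PySem.List.len board) 1).flatMap (fun i =>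
    (PySem.List.pyRange 0 (PySem.List.len (rowAt board 0)) 1).filterMap (fun j =>
      if cellD board i j = 0 then some (i, j) else none))

def colListOf (board : List (List Int)) (j : Int) : List Int :=
  (PySem.List.pyRange 0 9 1).map (fun i => cellD board i j)

def boxListOf (board : List (List Int)) (b : Int) : List Int :=
  (PySem.List.pyRange 0 3 1).flatMap (fun di =>
    (PySem.List.pyRange 0 3 1).map (fun dj =>
      cellD board (3 * PySem.Int.floordiv b 3 + di) (3 * PySem.Int.mod b 3 + dj)))

-- the digit loop of go(k); `go` is the recursive call on the remaining empty cells
def loopB (go : List (PySem.Set Int) → List (PySem.Set Int) → List (PySem.Set Int) → Int)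
    (r c b : Int) (rows cols boxes : List (PySem.Set Int)) : List Int → Int → Int
  | [], total => total
  | d :: ds, total =>
    if !(PySem.Set.contains (PySem.List.pyGetD rows r []) d)
        && !(PySem.Set.contains (PySem.List.pyGetD cols c []) d)
        && !(PySem.Set.contains (PySem.List.pyGetD boxes b []) d) then
      let rows1 := PySem.List.pySetD rows r (PySem.Set.add (PySem.List.pyGetD rows r []) d)
      let cols1 := PySem.List.pySetD cols c (PySem.Set.add (PySem.List.pyGetD cols c []) d)
      let boxes1 := PySem.List.pySetD boxes b (PySem.Set.add (PySem.List.pyGetD boxes b []) d)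
      let total' := total + go rows1 cols1 boxes1
      let rows2 := PySem.List.pySetD rows1 r (PySem.Set.discard (PySem.List.pyGetD rows1 r []) d)
      let cols2 := PySem.List.pySetD cols1 c (PySem.Set.discard (PySem.List.pyGetD cols1 c []) d)
      let boxes2 := PySem.List.pySetD boxes1 b (PySem.Set.discard (PySem.List.pyGetD boxes1 b []) d)
      if total' > 1 then 2 else loopB go r c b rows2 cols2 boxes2 ds total'
    else loopB go r c b rows cols boxes ds total

def goB : List (Int × Int) → List (PySem.Set Int) → List (PySem.Set Int) →
    List (PySem.Set Int) → Int
  | [], _, _, _ => 1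
  | (r, c) :: rest, rows, cols, boxes =>
    let b := PySem.Int.floordiv r 3 * 3 + PySem.Int.floordiv c 3
    loopB (fun rows cols boxes => goB rest rows cols boxes) r c b rows cols boxes
      (PySem.List.pyRange 1 10 1) 0

def solve_check_alt (board : List (List Int)) : Int :=
  let empties := emptiesOf board
  if empties = [] then 1
  else
    let rows := (PySem.List.pyRange 0 9 1).map (fun i => PySem.Set.ofList (rowAt board i))
    let cols := (PySem.List.pyRange 0 9 1).map (fun j => PySem.Set.ofList (colListOf board j))
    let boxes := (PySem.List.pyRange 0 9 1).map (fun b => PySem.Set.ofList (boxListOf board b))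
    goB empties rows cols boxes

-- ===== PRECONDITION & SPEC =====
-- Pre_ restricts to the natural domain: 9×9 Sudoku boards, plus any board whose scanned
-- region (columns 0..len(board[0]) of every row) is completely non-zero, where A returns 1
-- without touching the Sudoku rules.  Other shapes (e.g. a 3×3 board with a 0) are outside
-- the natural domain of a Sudoku solver: A either raises IndexError there or applies the
-- 9-digit/3×3-box rules to a non-Sudoku board, and B raises IndexError.
def Pre_solve_check (board : List (List Int)) : Prop :=
  (∀ row ∈ board, (board.headD []).length ≤ row.length ∧
      (0 : Int) ∉ row.take (board.headD []).length)
  ∨ (board.length = 9 ∧ ∀ row ∈ board, row.length = 9)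

instance (board : List (List Int)) : Decidable (Pre_solve_check board) := by
  unfold Pre_solve_check; infer_instance

def pvWitness_solve_check : List (List Int) :=
  [[5, 3, 0, 0, 7, 0, 0, 0, 0],
   [6, 0, 0, 1, 9, 5, 0, 0, 0],
   [0, 9, 8, 0, 0, 0, 0, 6, 0],
   [8, 0, 0, 0, 6, 0, 0, 0, 3],
   [4, 0, 0, 8, 0, 3, 0, 0, 1],
   [7, 0, 0, 0, 2, 0, 0, 0, 6],
   [0, 6, 0, 0, 0, 0, 2, 8, 0],
   [0, 0, 0, 4, 1, 9, 0, 0, 5],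
   [0, 0, 0, 0, 8, 0, 0, 7, 9]]

def Spec_solve_check (board : List (List Int)) (out : Int) : Prop := out = solve_check_alt board
instance (board : List (List Int)) (out : Int) : Decidable (Spec_solve_check board out) := by
  unfold Spec_solve_check; infer_instance

-- ===== CLAIM (what is proved, stated in full; the proofs are below) =====
def Claim_equal_solve_check : Prop :=
  ∀ (board : List (List Int)), Dom_solve_check board → Pre_solve_check board →
    Spec_solve_check board (solve_check board)


-- ===== LEMMAS AND PROOFS =====

-- proof-side notions
def Shape9 (B : List (List Int)) : Prop := B.length = 9 ∧ ∀ row ∈ B, row.length = 9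

def posList : List (Int × Int) :=
  (PySem.List.pyRange 0 9 1).flatMap (fun i => (PySem.List.pyRange 0 9 1).map (fun j => (i, j)))

def InvSets (B : List (List Int)) (rows cols boxes : List (PySem.Set Int)) : Prop :=
  rows.length = 9 ∧ cols.length = 9 ∧ boxes.length = 9 ∧
  (∀ r : Int, 0 ≤ r → r < 9 → ∀ v : Int, v ≠ 0 →
    (v ∈ PySem.List.pyGetD rows r [] ↔ v ∈ rowAt B r)) ∧
  (∀ c : Int, 0 ≤ c → c < 9 → ∀ v : Int, v ≠ 0 →
    (v ∈ PySem.List.pyGetD cols c [] ↔ v ∈ colListOf B c)) ∧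
  (∀ b : Int, 0 ≤ b → b < 9 → ∀ v : Int, v ≠ 0 →
    (v ∈ PySem.List.pyGetD boxes b [] ↔ v ∈ boxListOf B b))

lemma rowAt_eq_getElem (B : List (List Int)) (i : Int) (h0 : 0 ≤ i) (h : i.toNat < B.length) :
    rowAt B i = B[i.toNat] := by
  simp [rowAt, PySem.List.pyGet?_of_nonneg B h0, List.getElem?_eq_getElem h]

lemma rowAt_length (B : List (List Int)) (i : Int) (hS : Shape9 B) (h0 : 0 ≤ i) (h : i < 9) :
    (rowAt B i).length = 9 := by
  have h9 : B.length = 9 := hS.1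
  rw [rowAt_eq_getElem B i h0 (by omega)]
  exact hS.2 _ (List.getElem_mem _)

lemma cellD_eq_getElem (B : List (List Int)) (i j : Int) (hS : Shape9 B)
    (h0 : 0 ≤ i) (h : i < 9) (h0' : 0 ≤ j) (h' : j < 9) :
    cellD B i j = (rowAt B i)[j.toNat]'(by rw [rowAt_length B i hS h0 h]; omega) := by
  have hl : j.toNat < (rowAt B i).length := by rw [rowAt_length B i hS h0 h]; omega
  simp [cellD, PySem.List.pyGet?_of_nonneg _ h0', List.getElem?_eq_getElem hl]

lemma shape9_setCell (B : List (List Int)) (r c v : Int) (hS : Shape9 B)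
    (h0r : 0 ≤ r) (hr : r < 9) :
    Shape9 (setCell B r c v) := by
  unfold setCell
  rw [PySem.List.pySetD_of_nonneg B _ h0r]
  constructor
  · simpa using hS.1
  · intro row hrow
    rcases List.mem_or_eq_of_mem_set hrow with h | h
    · exact hS.2 _ h
    · subst h
      by_cases h0c : 0 ≤ c
      · rw [PySem.List.pySetD_of_nonneg _ _ h0c]
        simp [rowAt_length B r hS h0r hr]
      · -- c < 0: a cell filled by find_empty always has 0 ≤ c, but the lemma
        -- does not assume it; pySetD with a negative in-range index也 preserves length
        have : (PySem.List.pySetD (rowAt B r) c v).length = (rowAt B r).length :=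
          PySem.List.length_pySetD _ _ _
        rw [this]
        exact rowAt_length B r hS h0r hr

lemma rowAt_setCell (B : List (List Int)) (r c v i : Int) (hS : Shape9 B)
    (h0r : 0 ≤ r) (hr : r < 9) (h0i : 0 ≤ i) (hi : i < 9) :
    rowAt (setCell B r c v) i =
      if i = r then PySem.List.pySetD (rowAt B r) c v else rowAt B i := by
  unfold setCell
  conv_lhs => rw [rowAt, PySem.List.pySetD_of_nonneg B _ h0r, PySem.List.pyGet?_of_nonneg _ h0i]
  rw [List.getElem?_set]
  have h9 : B.length = 9 := hS.1
  by_cases hir : i = r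
  · subst hir
    simp only [if_pos rfl, if_pos (by omega : i.toNat < B.length)]
    simp
  · have : r.toNat ≠ i.toNat := by omega
    simp [this, hir, rowAt, PySem.List.pyGet?_of_nonneg B h0i]

lemma cellD_setCell (B : List (List Int)) (r c v i j : Int) (hS : Shape9 B)
    (h0r : 0 ≤ r) (hr : r < 9) (h0c : 0 ≤ c) (hc : c < 9)
    (h0i : 0 ≤ i) (hi : i < 9) (h0j : 0 ≤ j) (hj : j < 9) :
    cellD (setCell B r c v) i j = if i = r ∧ j = c then v else cellD B i j := by
  unfold cellD
  rw [rowAt_setCell B r c v i hS h0r hr h0i hi]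
  by_cases hir : i = r
  · subst hir
    rw [if_pos rfl, PySem.List.pySetD_of_nonneg _ _ h0c,
      PySem.List.pyGet?_of_nonneg _ h0j, PySem.List.pyGet?_of_nonneg _ h0j, List.getElem?_set]
    have hlen : (rowAt B i).length = 9 := rowAt_length B i hS h0i hi
    by_cases hjc : j = c
    · subst hjc
      simp [if_pos rfl, (by omega : j.toNat < (rowAt B i).length)]
    · have : c.toNat ≠ j.toNat := by omega
      simp [this, hjc]
  · simp [hir]

lemma zeros_setCell_lt (B : List (List Int)) (r c v : Int) (hS : Shape9 B)
    (h0r : 0 ≤ r) (hr : r < 9) (h0c : 0 ≤ c) (hc : c < 9)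
    (hz : cellD B r c = 0) (hv : v ≠ 0) :
    zerosOf (setCell B r c v) < zerosOf B := by
  have h9 : B.length = 9 := hS.1
  have hrn : r.toNat < B.length := by omega
  have hlen : (rowAt B r).length = 9 := rowAt_length B r hS h0r hr
  have hcn : c.toNat < (rowAt B r).length := by omega
  have hrow : rowAt B r = B[r.toNat] := rowAt_eq_getElem B r h0r hrn
  have hcell : (rowAt B r)[c.toNat] = 0 := by
    rw [← cellD_eq_getElem B r c hS h0r hr h0c hc]; exact hz
  -- the updated row has strictly fewer zeros
  have hcount : ((rowAt B r).set c.toNat v).count 0 < (rowAt B r).count 0 := by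
    conv_rhs => rw [← List.take_append_drop c.toNat (rowAt B r)]
    rw [List.set_eq_take_append_cons_drop, if_pos hcn,
      ← List.getElem_cons_drop hcn, hcell]
    simp only [List.count_append, List.count_cons]
    simp [hv]
  unfold zerosOf setCell
  rw [PySem.List.pySetD_of_nonneg B _ h0r, PySem.List.pySetD_of_nonneg _ _ h0c,
    List.map_set]
  have hmlen : r.toNat < (B.map (fun row => row.count 0)).length := by simpa using hrn
  rw [List.sum_set]
  conv_rhs => rw [← List.take_append_drop r.toNat (B.map (fun row => row.count 0)),
    ← List.getElem_cons_drop hmlen]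
  simp only [List.sum_append, List.sum_cons, if_pos hmlen]
  have : (B.map (fun row => row.count 0))[r.toNat] = (rowAt B r).count 0 := by
    simp [hrow]
  omega

lemma posList_nodup : posList.Nodup := by decide

lemma mem_posList (p : Int × Int) : p ∈ posList ↔ 0 ≤ p.1 ∧ p.1 < 9 ∧ 0 ≤ p.2 ∧ p.2 < 9 := by
  obtain ⟨a, b⟩ := p
  simp only [posList, List.mem_flatMap, List.mem_map, PySem.List.mem_pyRange_one]
  constructor
  · rintro ⟨i, ⟨hi1, hi2⟩, j, ⟨hj1, hj2⟩, h⟩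
    cases h; exact ⟨hi1, hi2, hj1, hj2⟩
  · rintro ⟨h1, h2, h3, h4⟩
    exact ⟨a, ⟨h1, h2⟩, b, ⟨h3, h4⟩, rfl⟩

lemma filterMap_guard_eq_map_filter (l : List Int) (p : Int → Prop) [DecidablePred p]
    (f : Int → Int × Int) :
    l.filterMap (fun x => if p x then some (f x) else none) =
      (l.filter (fun x => decide (p x))).map f := by
  induction l with
  | nil => rfl
  | cons a t ihl =>
    by_cases h : p a <;> simp [List.filterMap_cons, h, ihl]

lemma emptiesOf_eq_filter (B : List (List Int)) (hS : Shape9 B) :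
    emptiesOf B = posList.filter (fun p => cellD B p.1 p.2 == 0) := by
  have h9 : B.length = 9 := hS.1
  have hw : (rowAt B 0).length = 9 := rowAt_length B 0 hS (by omega) (by omega)
  unfold emptiesOf posList
  rw [List.filter_flatMap]
  simp only [PySem.List.len_eq, h9, hw]
  norm_num
  congr 1
  funext i
  rw [List.filter_map, filterMap_guard_eq_map_filter (PySem.List.pyRange 0 9 1)
    (fun j => cellD B i j = 0) (fun j => (i, j))]
  congr 1

lemma find_empty_eq_head (B : List (List Int)) :
    find_empty B = (emptiesOf B).head? := by
  simp [find_empty, emptiesOf, List.head?_flatMap, List.head?_filterMap]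

lemma filter_tail_of_nodup (l : List (Int × Int)) (P : Int × Int → Bool) (Q : Int × Int → Bool)
    (p0 : Int × Int) (rest : List (Int × Int)) (hnd : l.Nodup)
    (hPQ : ∀ x ∈ l, Q x = (P x && !(x == p0)))
    (h : l.filter P = p0 :: rest) :
    l.filter Q = rest := by
  rw [List.filter_eq_cons_iff] at h
  obtain ⟨l1, l2, rfl, hl1, hp0, hl2⟩ := h
  have hnd' := hnd
  rw [List.nodup_append] at hnd'
  have hp0l2 : p0 ∉ l2 := by
    have := hnd'.2.1
    rw [List.nodup_cons] at this
    exact this.1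
  rw [List.filter_append]
  have h1 : l1.filter Q = [] := by
    rw [List.filter_eq_nil_iff]
    intro x hx
    rw [hPQ x (by simp [hx])]
    simp [hl1 x hx]
  have h2 : Q p0 = false := by
    rw [hPQ p0 (by simp)]
    simp
  rw [List.filter_cons]
  simp only [h1, h2, List.nil_append, Bool.false_eq_true, if_false]
  rw [← hl2]
  apply List.filter_congr
  intro x hx
  rw [hPQ x (by simp [hx])]
  have : x ≠ p0 := fun hxe => hp0l2 (hxe ▸ hx)
  simp [this]

lemma emptiesOf_setCell (B : List (List Int)) (r c d : Int) (rest : List (Int × Int))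
    (hS : Shape9 B) (hE : emptiesOf B = (r, c) :: rest) (hd : d ≠ 0) :
    emptiesOf (setCell B r c d) = rest := by
  have hB := emptiesOf_eq_filter B hS
  rw [hB] at hE
  have hmem : ((r, c) : Int × Int) ∈ posList := by
    have : ((r, c) : Int × Int) ∈ posList.filter (fun p => cellD B p.1 p.2 == 0) := by
      rw [hE]; exact List.mem_cons_self
    exact (List.mem_filter.mp this).1
  have hb := (mem_posList (r, c)).mp hmem
  obtain ⟨h0r, hr, h0c, hc⟩ := hb
  have hcell : cellD B r c = 0 := by
    have : ((r, c) : Int × Int) ∈ posList.filter (fun p => cellD B p.1 p.2 == 0) := by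
      rw [hE]; exact List.mem_cons_self
    have := (List.mem_filter.mp this).2
    simpa using this
  have hS' : Shape9 (setCell B r c d) := shape9_setCell B r c d hS h0r hr
  rw [emptiesOf_eq_filter _ hS']
  apply filter_tail_of_nodup posList (fun p => cellD B p.1 p.2 == 0)
    (fun p => cellD (setCell B r c d) p.1 p.2 == 0) (r, c) rest posList_nodup _ hE
  intro x hx
  obtain ⟨a, b⟩ := x
  obtain ⟨h0a, ha, h0b, hb'⟩ := (mem_posList (a, b)).mp hx
  simp only []
  rw [cellD_setCell B r c d a b hS h0r hr h0c hc h0a ha h0b hb']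
  by_cases hab : a = r ∧ b = c
  · obtain ⟨rfl, rfl⟩ := hab
    simp [hd]
  · rw [if_neg hab]
    have : ((a, b) : Int × Int) ≠ (r, c) := by
      intro hq
      apply hab
      constructor <;> (injection hq with h1 h2) <;> simp [h1, h2]
    simp [this]

lemma head_empties_facts (B : List (List Int)) (r c : Int) (rest : List (Int × Int))
    (hS : Shape9 B) (hE : emptiesOf B = (r, c) :: rest) :
    (0 ≤ r ∧ r < 9 ∧ 0 ≤ c ∧ c < 9) ∧ cellD B r c = 0 := by
  rw [emptiesOf_eq_filter B hS] at hE
  have : ((r, c) : Int × Int) ∈ posList.filter (fun p => cellD B p.1 p.2 == 0) := by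
    rw [hE]; exact List.mem_cons_self
  have h1 := (List.mem_filter.mp this).1
  have h2 := (List.mem_filter.mp this).2
  exact ⟨(mem_posList (r, c)).mp h1, by simpa using h2⟩

lemma mem_colListOf (B : List (List Int)) (j v : Int) :
    v ∈ colListOf B j ↔ ∃ i : Int, 0 ≤ i ∧ i < 9 ∧ cellD B i j = v := by
  simp only [colListOf, List.mem_map, PySem.List.mem_pyRange_one]
  constructor
  · rintro ⟨i, ⟨h1, h2⟩, h3⟩
    exact ⟨i, h1, h2, h3⟩
  · rintro ⟨i, h1, h2, h3⟩
    exact ⟨i, ⟨h1, h2⟩, h3⟩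

lemma mem_boxListOf (B : List (List Int)) (b v : Int) :
    v ∈ boxListOf B b ↔ ∃ di dj : Int, 0 ≤ di ∧ di < 3 ∧ 0 ≤ dj ∧ dj < 3 ∧
      cellD B (3 * PySem.Int.floordiv b 3 + di) (3 * PySem.Int.mod b 3 + dj) = v := by
  simp only [boxListOf, List.mem_flatMap, List.mem_map, PySem.List.mem_pyRange_one]
  constructor
  · rintro ⟨di, ⟨h1, h2⟩, dj, ⟨h3, h4⟩, h5⟩
    exact ⟨di, dj, h1, h2, h3, h4, h5⟩
  · rintro ⟨di, dj, h1, h2, h3, h4, h5⟩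
    exact ⟨di, ⟨h1, h2⟩, dj, ⟨h3, h4⟩, h5⟩

-- the box hit by cell (r, c) is exactly b = (r//3)*3 + c//3
lemma valid_iff (B : List (List Int)) (d r c : Int) (rows cols boxes : List (PySem.Set Int))
    (hS : Shape9 B) (hInv : InvSets B rows cols boxes)
    (h0r : 0 ≤ r) (hr : r < 9) (h0c : 0 ≤ c) (hc : c < 9) (hd1 : 1 ≤ d) (hd9 : d < 10) :
    is_valid B d (r, c) =
      (!(PySem.Set.contains (PySem.List.pyGetD rows r []) d)
        && !(PySem.Set.contains (PySem.List.pyGetD cols c []) d)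
        && !(PySem.Set.contains (PySem.List.pyGetD boxes
              (PySem.Int.floordiv r 3 * 3 + PySem.Int.floordiv c 3) []) d)) := by
  obtain ⟨hlr, hlc, hlb, hrow, hcol, hbox⟩ := hInv
  have hd0 : d ≠ 0 := by omega
  have h9 : ((B.length : Int)) = 9 := by exact_mod_cast hS.1
  have hqr3 : PySem.Int.floordiv r 3 = r / 3 := PySem.Int.floordiv_eq_ediv_of_pos (by omega)
  have hqc3 : PySem.Int.floordiv c 3 = c / 3 := PySem.Int.floordiv_eq_ediv_of_pos (by omega)
  set b : Int := PySem.Int.floordiv r 3 * 3 + PySem.Int.floordiv c 3 with hbdef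
  have h0b : 0 ≤ b := by rw [hbdef, hqr3, hqc3]; omega
  have hb9 : b < 9 := by rw [hbdef, hqr3, hqc3]; omega
  have hbq : PySem.Int.floordiv b 3 = PySem.Int.floordiv r 3 := by
    rw [PySem.Int.floordiv_eq_ediv_of_pos (by omega : (0:Int) < 3), hbdef, hqr3, hqc3]; omega
  have hbm : PySem.Int.mod b 3 = PySem.Int.floordiv c 3 := by
    rw [PySem.Int.mod_eq_emod_of_pos (by omega : (0:Int) < 3), hbdef, hqr3, hqc3]; omega
  have h1 : (rowAt B r).contains d = PySem.Set.contains (PySem.List.pyGetD rows r []) d := by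
    rw [Bool.eq_iff_iff, List.contains_iff_mem, PySem.Set.contains_iff]
    exact (hrow r h0r hr d hd0).symm
  have h2 : ((PySem.List.pyRange 0 (PySem.List.len B) 1).map (fun i => cellD B i c)).contains d
      = PySem.Set.contains (PySem.List.pyGetD cols c []) d := by
    rw [Bool.eq_iff_iff, List.contains_iff_mem, PySem.Set.contains_iff,
      hcol c h0c hc d hd0, PySem.List.len_eq, h9]
    rfl
  have h3 : ((PySem.List.pyRange (PySem.Int.floordiv r 3 * 3) (PySem.Int.floordiv r 3 * 3 + 3) 1).any
        (fun i => (PySem.List.pyRange (PySem.Int.floordiv c 3 * 3) (PySem.Int.floordiv c 3 * 3 + 3) 1).any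
          (fun j => cellD B i j == d)))
      = PySem.Set.contains (PySem.List.pyGetD boxes b []) d := by
    rw [Bool.eq_iff_iff, PySem.Set.contains_iff, hbox b h0b hb9 d hd0, mem_boxListOf, hbq, hbm]
    simp only [List.any_eq_true, PySem.List.mem_pyRange_one, beq_iff_eq]
    constructor
    · rintro ⟨i, ⟨hi1, hi2⟩, j, ⟨hj1, hj2⟩, hcd⟩
      refine ⟨i - PySem.Int.floordiv r 3 * 3, j - PySem.Int.floordiv c 3 * 3,
        by omega, by omega, by omega, by omega, ?_⟩
      rw [← hcd]
      congr 1 <;> ring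
    · rintro ⟨di, dj, h1', h2', h3', h4', h5'⟩
      refine ⟨3 * PySem.Int.floordiv r 3 + di, ⟨by omega, by omega⟩,
        3 * PySem.Int.floordiv c 3 + dj, ⟨by omega, by omega⟩, ?_⟩
      exact h5'
  unfold is_valid
  simp only []
  rw [h1, h2, h3]
  cases hA : PySem.Set.contains (PySem.List.pyGetD rows r []) d <;>
    cases hB : PySem.Set.contains (PySem.List.pyGetD cols c []) d <;>
      cases hC : PySem.Set.contains (PySem.List.pyGetD boxes b []) d <;> simp

lemma pyGetD_pySetD_set (s : List (PySem.Set Int)) (i j : Int) (x : PySem.Set Int)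
    (h0i : 0 ≤ i) (hi : i.toNat < s.length) (h0j : 0 ≤ j) :
    PySem.List.pyGetD (PySem.List.pySetD s i x) j [] = if j = i then x else PySem.List.pyGetD s j [] := by
  rw [PySem.List.pySetD_of_nonneg _ _ h0i, PySem.List.pyGetD_of_nonneg _ _ h0j,
    PySem.List.pyGetD_of_nonneg _ _ h0j]
  rw [List.getD_eq_getElem?_getD, List.getD_eq_getElem?_getD, List.getElem?_set]
  by_cases hji : j = i
  · subst hji; simp [hi]
  · have : i.toNat ≠ j.toNat := by omega
    simp [this, hji]

lemma mem_set_row_zero (row : List Int) (c v d : Int)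
    (h0c : 0 ≤ c) (hc : c.toNat < row.length) (hz : row[c.toNat] = 0) (hv : v ≠ 0) :
    (v ∈ PySem.List.pySetD row c d ↔ v ∈ row ∨ v = d) := by
  rw [PySem.List.pySetD_of_nonneg _ _ h0c, List.set_eq_take_append_cons_drop, if_pos hc]
  conv_rhs => rw [← List.take_append_drop c.toNat row, ← List.getElem_cons_drop hc, hz]
  simp only [List.mem_append, List.mem_cons]
  constructor
  · rintro (h | h | h)
    · exact Or.inl (Or.inl h)
    · exact Or.inr h
    · exact Or.inl (Or.inr (Or.inr h))
  · rintro ((h | h | h) | h)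
    · exact Or.inl h
    · exact absurd h hv
    · exact Or.inr (Or.inr h)
    · exact Or.inr (Or.inl h)

lemma inv_update (B : List (List Int)) (r c d : Int) (rows cols boxes : List (PySem.Set Int))
    (hS : Shape9 B) (hInv : InvSets B rows cols boxes)
    (h0r : 0 ≤ r) (hr : r < 9) (h0c : 0 ≤ c) (hc : c < 9)
    (hcell : cellD B r c = 0) (hd1 : 1 ≤ d) (hd9 : d < 10) :
    InvSets (setCell B r c d)
      (PySem.List.pySetD rows r (PySem.Set.add (PySem.List.pyGetD rows r []) d))
      (PySem.List.pySetD cols c (PySem.Set.add (PySem.List.pyGetD cols c []) d))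
      (PySem.List.pySetD boxes (PySem.Int.floordiv r 3 * 3 + PySem.Int.floordiv c 3)
        (PySem.Set.add (PySem.List.pyGetD boxes
          (PySem.Int.floordiv r 3 * 3 + PySem.Int.floordiv c 3) []) d)) := by
  obtain ⟨hlr, hlc, hlb, hrow, hcol, hbox⟩ := hInv
  have hd0 : d ≠ 0 := by omega
  have hS' : Shape9 (setCell B r c d) := shape9_setCell B r c d hS h0r hr
  have hqr3 : PySem.Int.floordiv r 3 = r / 3 := PySem.Int.floordiv_eq_ediv_of_pos (by omega)
  have hqc3 : PySem.Int.floordiv c 3 = c / 3 := PySem.Int.floordiv_eq_ediv_of_pos (by omega)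
  set b : Int := PySem.Int.floordiv r 3 * 3 + PySem.Int.floordiv c 3 with hbdef
  have h0b : 0 ≤ b := by rw [hbdef, hqr3, hqc3]; omega
  have hb9 : b < 9 := by rw [hbdef, hqr3, hqc3]; omega
  have hrl : (rowAt B r).length = 9 := rowAt_length B r hS h0r hr
  have hcellg : (rowAt B r)[c.toNat]'(by omega) = 0 := by
    rw [← cellD_eq_getElem B r c hS h0r hr h0c hc]; exact hcell
  refine ⟨by rw [PySem.List.pySetD_of_nonneg _ _ h0r]; simpa using hlr,
          by rw [PySem.List.pySetD_of_nonneg _ _ h0c]; simpa using hlc,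
          by rw [PySem.List.pySetD_of_nonneg _ _ h0b]; simpa using hlb, ?_, ?_, ?_⟩
  · -- rows
    intro r' h0r' hr' v hv
    rw [pyGetD_pySetD_set rows r r' _ h0r (by omega) h0r',
      rowAt_setCell B r c d r' hS h0r hr h0r' hr']
    by_cases hrr : r' = r
    · subst hrr
      rw [if_pos rfl, if_pos rfl, PySem.Set.mem_add,
        mem_set_row_zero (rowAt B r') c v d h0c (by omega) hcellg hv,
        hrow r' h0r' hr' v hv]
    · rw [if_neg hrr, if_neg hrr]
      exact hrow r' h0r' hr' v hv
  · -- cols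
    intro c' h0c' hc' v hv
    rw [pyGetD_pySetD_set cols c c' _ h0c (by omega) h0c']
    by_cases hcc : c' = c
    · subst hcc
      rw [if_pos rfl, PySem.Set.mem_add, hcol c' h0c' hc' v hv]
      rw [mem_colListOf, mem_colListOf]
      constructor
      · rintro (⟨i, h1, h2, h3⟩ | hvd)
        · refine ⟨i, h1, h2, ?_⟩
          rw [cellD_setCell B r c' d i c' hS h0r hr h0c' hc' h1 h2 h0c' hc']
          by_cases hir : i = r
          · exfalso; subst hir; rw [h3] at hcell; exact hv hcell
          · rw [if_neg (by tauto)]; exact h3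
        · refine ⟨r, h0r, hr, ?_⟩
          rw [cellD_setCell B r c' d r c' hS h0r hr h0c' hc' h0r hr h0c' hc',
            if_pos ⟨rfl, rfl⟩]
          exact hvd.symm
      · rintro ⟨i, h1, h2, h3⟩
        rw [cellD_setCell B r c' d i c' hS h0r hr h0c' hc' h1 h2 h0c' hc'] at h3
        by_cases hir : i = r
        · right; rw [if_pos (by tauto)] at h3; exact h3.symm
        · left; exact ⟨i, h1, h2, by rw [if_neg (by tauto)] at h3; exact h3⟩
    · rw [if_neg hcc, hcol c' h0c' hc' v hv, mem_colListOf, mem_colListOf]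
      constructor <;> rintro ⟨i, h1, h2, h3⟩ <;> refine ⟨i, h1, h2, ?_⟩
      · rw [cellD_setCell B r c d i c' hS h0r hr h0c hc h1 h2 h0c' hc',
          if_neg (by tauto)]
        exact h3
      · rw [cellD_setCell B r c d i c' hS h0r hr h0c hc h1 h2 h0c' hc',
          if_neg (by tauto)] at h3
        exact h3
  · -- boxes
    intro b' h0b' hb' v hv
    rw [pyGetD_pySetD_set boxes b b' _ h0b (by omega) h0b']
    have hq3 : PySem.Int.floordiv b' 3 = b' / 3 := PySem.Int.floordiv_eq_ediv_of_pos (by omega)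
    have hm3 : PySem.Int.mod b' 3 = b' % 3 := PySem.Int.mod_eq_emod_of_pos (by omega)
    have hidx : ∀ di dj : Int, 0 ≤ di → di < 3 → 0 ≤ dj → dj < 3 →
        (0 ≤ 3 * PySem.Int.floordiv b' 3 + di ∧ 3 * PySem.Int.floordiv b' 3 + di < 9 ∧
         0 ≤ 3 * PySem.Int.mod b' 3 + dj ∧ 3 * PySem.Int.mod b' 3 + dj < 9) := by
      intro di dj hd1 hd2 hd3 hd4
      rw [hq3, hm3]; omega
    by_cases hbb : b' = b
    · subst hbb
      rw [if_pos rfl, PySem.Set.mem_add, hbox b h0b hb9 v hv,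
        mem_boxListOf, mem_boxListOf]
      constructor
      · rintro (⟨di, dj, h1, h2, h3, h4, h5⟩ | hvd)
        · obtain ⟨hi0, hi9, hj0, hj9⟩ := hidx di dj h1 h2 h3 h4
          refine ⟨di, dj, h1, h2, h3, h4, ?_⟩
          rw [cellD_setCell B r c d _ _ hS h0r hr h0c hc hi0 hi9 hj0 hj9]
          by_cases hhit : 3 * PySem.Int.floordiv b 3 + di = r ∧ 3 * PySem.Int.mod b 3 + dj = c
          · exfalso
            rw [hhit.1, hhit.2, hcell] at h5
            exact hv h5.symm
          · rw [if_neg hhit]; exact h5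
        · refine ⟨r - 3 * PySem.Int.floordiv b 3, c - 3 * PySem.Int.mod b 3,
            by rw [hq3, hbdef, hqr3, hqc3] at *; omega,
            by rw [hq3, hbdef, hqr3, hqc3] at *; omega,
            by rw [hm3, hbdef, hqr3, hqc3] at *; omega,
            by rw [hm3, hbdef, hqr3, hqc3] at *; omega, ?_⟩
          have e1 : 3 * PySem.Int.floordiv b 3 + (r - 3 * PySem.Int.floordiv b 3) = r := by ring
          have e2 : 3 * PySem.Int.mod b 3 + (c - 3 * PySem.Int.mod b 3) = c := by ring
          rw [e1, e2, cellD_setCell B r c d r c hS h0r hr h0c hc h0r hr h0c hc,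
            if_pos ⟨rfl, rfl⟩]
          exact hvd.symm
      · rintro ⟨di, dj, h1, h2, h3, h4, h5⟩
        obtain ⟨hi0, hi9, hj0, hj9⟩ := hidx di dj h1 h2 h3 h4
        rw [cellD_setCell B r c d _ _ hS h0r hr h0c hc hi0 hi9 hj0 hj9] at h5
        by_cases hhit : 3 * PySem.Int.floordiv b 3 + di = r ∧ 3 * PySem.Int.mod b 3 + dj = c
        · right; rw [if_pos hhit] at h5; exact h5.symm
        · left; exact ⟨di, dj, h1, h2, h3, h4, by rw [if_neg hhit] at h5; exact h5⟩
    · rw [if_neg hbb, hbox b' h0b' hb' v hv, mem_boxListOf, mem_boxListOf]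
      have hnohit : ∀ di dj : Int, 0 ≤ di → di < 3 → 0 ≤ dj → dj < 3 →
          ¬(3 * PySem.Int.floordiv b' 3 + di = r ∧ 3 * PySem.Int.mod b' 3 + dj = c) := by
        intro di dj hd1 hd2 hd3 hd4 ⟨he1, he2⟩
        apply hbb
        rw [hq3] at he1; rw [hm3] at he2
        rw [hbdef, hqr3, hqc3]
        omega
      constructor <;> rintro ⟨di, dj, h1, h2, h3, h4, h5⟩ <;>
        obtain ⟨hi0, hi9, hj0, hj9⟩ := hidx di dj h1 h2 h3 h4 <;>
        refine ⟨di, dj, h1, h2, h3, h4, ?_⟩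
      · rw [← h5, cellD_setCell B r c d _ _ hS h0r hr h0c hc hi0 hi9 hj0 hj9,
          if_neg (hnohit di dj h1 h2 h3 h4)]
      · rw [cellD_setCell B r c d _ _ hS h0r hr h0c hc hi0 hi9 hj0 hj9,
          if_neg (hnohit di dj h1 h2 h3 h4)] at h5
        exact h5

lemma restore_set (s : List (PySem.Set Int)) (r : Int) (d : Int)
    (h0r : 0 ≤ r) (hr : r.toNat < s.length)
    (hni : PySem.Set.contains (PySem.List.pyGetD s r []) d = false) :
    (PySem.List.pySetD (PySem.List.pySetD s r (PySem.Set.add (PySem.List.pyGetD s r []) d)) r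
      (PySem.Set.discard (PySem.List.pyGetD
        (PySem.List.pySetD s r (PySem.Set.add (PySem.List.pyGetD s r []) d)) r []) d)) = s := by
  have hnm : d ∉ PySem.List.pyGetD s r [] := by
    intro hm
    rw [← PySem.Set.contains_iff] at hm
    rw [hni] at hm
    cases hm
  have hadd : PySem.Set.add (PySem.List.pyGetD s r []) d = PySem.List.pyGetD s r [] ++ [d] :=
    PySem.Set.add_of_not_mem hnm
  rw [pyGetD_pySetD_set s r r _ h0r hr h0r, if_pos rfl, hadd]
  have hdisc : PySem.Set.discard (PySem.List.pyGetD s r [] ++ [d]) d = PySem.List.pyGetD s r [] := by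
    unfold PySem.Set.discard
    rw [List.filter_append]
    have h1 : (PySem.List.pyGetD s r []).filter (fun y => !y == d) = PySem.List.pyGetD s r [] := by
      apply List.filter_eq_self.mpr
      intro x hx
      simp only [Bool.not_eq_eq_eq_not, Bool.not_true, beq_eq_false_iff_ne, ne_eq]
      intro hxd
      exact hnm (hxd ▸ hx)
    have h2 : ([d].filter (fun y => !y == d)) = [] := by simp
    rw [h1, h2, List.append_nil]
  rw [hdisc, PySem.List.pySetD_of_nonneg _ _ h0r, PySem.List.pySetD_of_nonneg _ _ h0r,
    List.set_set, PySem.List.pyGetD_of_nonneg _ _ h0r, List.getD_eq_getElem?_getD,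
    List.getElem?_eq_getElem hr]
  simp only [Option.getD_some]
  exact List.set_getElem_self hr

lemma loop_equiv (f : Nat) (B : List (List Int)) (r c : Int) (rest : List (Int × Int))
    (hS : Shape9 B) (hz : zerosOf B < f + 1) (hE : emptiesOf B = (r, c) :: rest)
    (ih : ∀ B' rows cols boxes, Shape9 B' → zerosOf B' < f → InvSets B' rows cols boxes →
      solveA f B' = goB (emptiesOf B') rows cols boxes) :
    ∀ ds : List Int, (∀ d ∈ ds, (1 : Int) ≤ d ∧ d < 10) →
    ∀ (count : Int) (rows cols boxes : List (PySem.Set Int)), InvSets B rows cols boxes →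
      loopA (solveA f) B r c ds count =
        loopB (fun rows cols boxes => goB rest rows cols boxes) r c
          (PySem.Int.floordiv r 3 * 3 + PySem.Int.floordiv c 3)
          rows cols boxes ds count := by
  intro ds
  induction ds with
  | nil =>
    intro _ count rows cols boxes _
    simp [loopA, loopB]
  | cons d ds ihd =>
    intro hds count rows cols boxes hInv
    obtain ⟨⟨h0r, hr, h0c, hc⟩, hcell⟩ := head_empties_facts B r c rest hS hE
    have hd := hds d List.mem_cons_self
    have hg := valid_iff B d r c rows cols boxes hS hInv h0r hr h0c hc hd.1 hd.2
    obtain ⟨hlr, hlc, hlb, _, _, _⟩ := hInv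
    simp only [loopA, loopB]
    rw [hg]
    cases hguard : (!(PySem.Set.contains (PySem.List.pyGetD rows r []) d)
        && !(PySem.Set.contains (PySem.List.pyGetD cols c []) d)
        && !(PySem.Set.contains (PySem.List.pyGetD boxes
              (PySem.Int.floordiv r 3 * 3 + PySem.Int.floordiv c 3) []) d)) with
    | false =>
      simp only [Bool.false_eq_true, if_false]
      exact ihd (fun x hx => hds x (List.mem_cons_of_mem d hx)) count rows cols boxes
        ⟨hlr, hlc, hlb, by assumption, by assumption, by assumption⟩
    | true =>
      simp only [if_true]
      have hInv' : InvSets B rows cols boxes :=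
        ⟨hlr, hlc, hlb, by assumption, by assumption, by assumption⟩
      have hrec : solveA f (setCell B r c d) =
          goB rest
            (PySem.List.pySetD rows r (PySem.Set.add (PySem.List.pyGetD rows r []) d))
            (PySem.List.pySetD cols c (PySem.Set.add (PySem.List.pyGetD cols c []) d))
            (PySem.List.pySetD boxes (PySem.Int.floordiv r 3 * 3 + PySem.Int.floordiv c 3)
              (PySem.Set.add (PySem.List.pyGetD boxes
                (PySem.Int.floordiv r 3 * 3 + PySem.Int.floordiv c 3) []) d)) := by
        have hz' := zeros_setCell_lt B r c d hS h0r hr h0c hc hcell (by omega)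
        have := ih (setCell B r c d) _ _ _ (shape9_setCell B r c d hS h0r hr)
          (by omega)
          (inv_update B r c d rows cols boxes hS hInv' h0r hr h0c hc hcell hd.1 hd.2)
        rw [emptiesOf_setCell B r c d rest hS hE (by omega)] at this
        exact this
      rw [hrec]
      by_cases hcnt : count + goB rest
            (PySem.List.pySetD rows r (PySem.Set.add (PySem.List.pyGetD rows r []) d))
            (PySem.List.pySetD cols c (PySem.Set.add (PySem.List.pyGetD cols c []) d))
            (PySem.List.pySetD boxes (PySem.Int.floordiv r 3 * 3 + PySem.Int.floordiv c 3)
              (PySem.Set.add (PySem.List.pyGetD boxes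
                (PySem.Int.floordiv r 3 * 3 + PySem.Int.floordiv c 3) []) d)) > 1
      · rw [if_pos hcnt, if_pos hcnt]
      · rw [if_neg hcnt, if_neg hcnt]
        -- the three contains are false on the guard
        have hgf : PySem.Set.contains (PySem.List.pyGetD rows r []) d = false ∧
            PySem.Set.contains (PySem.List.pyGetD cols c []) d = false ∧
            PySem.Set.contains (PySem.List.pyGetD boxes
              (PySem.Int.floordiv r 3 * 3 + PySem.Int.floordiv c 3) []) d = false := by
          rcases Bool.and_eq_true_iff.mp hguard with ⟨hab, hc3⟩
          rcases Bool.and_eq_true_iff.mp hab with ⟨ha, hb⟩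
          simp only [Bool.not_eq_true'] at ha hb hc3
          exact ⟨ha, hb, hc3⟩
        have h0b : 0 ≤ PySem.Int.floordiv r 3 * 3 + PySem.Int.floordiv c 3 := by
          rw [PySem.Int.floordiv_eq_ediv_of_pos (by omega : (0:Int) < 3),
            PySem.Int.floordiv_eq_ediv_of_pos (by omega : (0:Int) < 3)]; omega
        have hb9 : PySem.Int.floordiv r 3 * 3 + PySem.Int.floordiv c 3 < 9 := by
          rw [PySem.Int.floordiv_eq_ediv_of_pos (by omega : (0:Int) < 3),
            PySem.Int.floordiv_eq_ediv_of_pos (by omega : (0:Int) < 3)]; omega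
        rw [restore_set rows r d h0r (by omega) hgf.1,
          restore_set cols c d h0c (by omega) hgf.2.1,
          restore_set boxes _ d h0b (by omega) hgf.2.2]
        exact ihd (fun x hx => hds x (List.mem_cons_of_mem d hx)) _ rows cols boxes hInv'

lemma main_equiv (f : Nat) : ∀ (B : List (List Int)) (rows cols boxes : List (PySem.Set Int)),
    Shape9 B → zerosOf B < f → InvSets B rows cols boxes →
    solveA f B = goB (emptiesOf B) rows cols boxes := by
  induction f with
  | zero => intro B rows cols boxes _ hz _; omega
  | succ f ih =>
    intro B rows cols boxes hS hz hInv
    cases hE : emptiesOf B with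
    | nil =>
      have hf : find_empty B = none := by rw [find_empty_eq_head, hE]; rfl
      simp [solveA, hf, goB]
    | cons p rest =>
      obtain ⟨r, c⟩ := p
      have hf : find_empty B = some (r, c) := by rw [find_empty_eq_head, hE]; rfl
      simp only [solveA, hf, goB]
      exact loop_equiv f B r c rest hS hz hE ih (PySem.List.pyRange 1 10 1)
        (fun d hd => by rw [PySem.List.mem_pyRange_one] at hd; exact ⟨hd.1, hd.2⟩)
        0 rows cols boxes hInv

lemma pre_no_empty (board : List (List Int))
    (h : ∀ row ∈ board, (board.headD []).length ≤ row.length ∧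
      (0 : Int) ∉ row.take (board.headD []).length) :
    emptiesOf board = [] := by
  unfold emptiesOf
  rw [List.flatMap_eq_nil_iff]
  intro i hi
  rw [List.filterMap_eq_nil_iff]
  intro j hj
  rw [PySem.List.mem_pyRange_one] at hi hj
  rw [PySem.List.len_eq] at hi
  simp only [ite_eq_right_iff]
  intro hcell
  exfalso
  -- board is nonempty (otherwise the ranges are empty)
  match board, hi, h, hcell, hj with
  | [], hi, _, _, _ => simp at hi; omega
  | row0 :: tl, hi, h, hcell, hj =>
    have hw : (rowAt (row0 :: tl) 0).length = row0.length := by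
      simp [rowAt, PySem.List.pyGet?_zero_cons]
    rw [PySem.List.len_eq, hw] at hj
    have hrow := h ((row0 :: tl)[i.toNat]) (List.getElem_mem (by omega))
    simp only [List.headD_cons] at hrow
    have hcell' : cellD (row0 :: tl) i j = (row0 :: tl)[i.toNat][j.toNat] := by
      have hjl : j.toNat < ((row0 :: tl)[i.toNat]).length := by
        have := hrow.1; omega
      simp [cellD, rowAt, PySem.List.pyGet?_of_nonneg _ hi.1,
        PySem.List.pyGet?_of_nonneg _ hj.1,
        List.getElem?_eq_getElem (by omega : i.toNat < (row0 :: tl).length),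
        List.getElem?_eq_getElem hjl]
    rw [hcell'] at hcell
    apply hrow.2
    rw [← hcell]
    have hjt : j.toNat < row0.length := by omega
    have hjl : j.toNat < ((row0 :: tl)[i.toNat]).length := by have := hrow.1; omega
    rw [List.mem_take_iff_getElem]
    exact ⟨j.toNat, by simp; omega, by simp⟩


-- ===== VERDICT (by name: the statement is the Claim_ definition above) =====
theorem solve_check_spec : Claim_equal_solve_check := by
  intro board _ hPre
  unfold Spec_solve_check solve_check solve_check_alt
  cases hE : emptiesOf board with
  | nil =>
    simp only [hE, if_pos rfl]
    simp [solveA, find_empty_eq_head, hE]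
  | cons p rest =>
    obtain ⟨r, c⟩ := p
    have hS : Shape9 board := by
      rcases hPre with h1 | h2
      · exact absurd (pre_no_empty board h1) (by simp [hE])
      · exact h2
    have hInv : InvSets board
        ((PySem.List.pyRange 0 9 1).map (fun i => PySem.Set.ofList (rowAt board i)))
        ((PySem.List.pyRange 0 9 1).map (fun j => PySem.Set.ofList (colListOf board j)))
        ((PySem.List.pyRange 0 9 1).map (fun b => PySem.Set.ofList (boxListOf board b))) := by
      refine ⟨by simp [PySem.List.length_pyRange_one], by simp [PySem.List.length_pyRange_one],
        by simp [PySem.List.length_pyRange_one], ?_, ?_, ?_⟩ <;>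
      · intro i h0 h9 v hv
        rw [PySem.List.pyGetD_map_pyRange_of_nonneg _ 9 i _ h0 h9]
        exact PySem.Set.mem_ofList _ _
    have := main_equiv (zerosOf board + 1) board _ _ _ hS (by omega) hInv
    simp only [hE] at this ⊢
    simp [this]
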